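-- pv_equiv track=rewrite | github.com/AnnaaKorzhenko/simplified-transformer | ltl_formulas/formula_generator.py | evaluate_not_a_until_b_and_c
-- ===== SOURCE A (Python) =====
-- from typing import List, Tuple, Set
--
-- def evaluate_not_a_until_b_and_c(sequence: List[str], a: str, b: str, c: str) -> bool:
--     """
--     Evaluate "not a until b and c"
--     This means: a does not hold until both b and c hold simultaneously
--
--     Returns True if:
--     - For all positions before the first occurrence where both b and c are true,
--       a is false at those positions
--     - If b and c never both occur, then a must never occur in the sequence
--
--     Args:
--         sequence: List of symbols (strings)
--         a, b, c: Symbol strings (can be multi-character like 'p1', 'p2')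
--     """
--     if not sequence:
--         return True
--
--     # Find first position where both b and c occur
--     first_bc_position = None
--     for i, symbol in enumerate(sequence):
--         if symbol == b or symbol == c:
--             # Check if have seen both b and c up to this point
--             symbols_seen = set(sequence[:i+1])
--             if b in symbols_seen and c in symbols_seen:
--                 first_bc_position = i
--                 break
--
--     if first_bc_position is None:
--         # b and c never both occur, so a must never occur
--         return a not in sequence
--
--     # Check that a does not occur before first_bc_position
--     return a not in sequence[:first_bc_position]
-- ===== SOURCE B (Python) =====
-- def evaluate_not_a_until_b_and_c(sequence, a, b, c):
--     seen_a = seen_b = seen_c = False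
--     for sym in sequence:
--         if sym == b:
--             seen_b = True
--         if sym == c:
--             seen_c = True
--         if (sym == b or sym == c) and seen_b and seen_c:
--             return not seen_a
--         if sym == a:
--             seen_a = True
--     return not seen_a
-- ===== Notes on version B (the rewrite author's own statement) =====
-- stated objective: simpler
-- what changed: Replaced the loop that rebuilds set(sequence[:i+1]) at each b/c hit and then re-scans the list/prefix with 'in' by a single pass carrying three seen-flags for a, b and c that returns as soon as b and c have both been seen.
import Mathlib
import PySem

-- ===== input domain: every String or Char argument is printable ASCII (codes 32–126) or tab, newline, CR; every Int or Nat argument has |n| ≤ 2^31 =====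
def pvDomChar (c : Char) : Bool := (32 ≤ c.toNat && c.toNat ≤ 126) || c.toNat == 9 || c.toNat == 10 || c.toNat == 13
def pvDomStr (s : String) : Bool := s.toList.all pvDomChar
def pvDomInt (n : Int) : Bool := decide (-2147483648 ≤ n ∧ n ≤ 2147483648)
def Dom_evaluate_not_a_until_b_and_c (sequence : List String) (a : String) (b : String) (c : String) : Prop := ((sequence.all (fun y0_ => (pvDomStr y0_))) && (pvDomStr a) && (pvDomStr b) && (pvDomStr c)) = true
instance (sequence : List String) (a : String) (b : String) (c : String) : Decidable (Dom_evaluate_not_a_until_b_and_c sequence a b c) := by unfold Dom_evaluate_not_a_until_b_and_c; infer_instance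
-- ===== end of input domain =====

-- B replaces A's search loop (set(sequence[:i+1]) rebuilt at each b/c hit, plus separate 'in' scans) by one pass over three seen-flags (simpler); no side effects.

-- ===== PORT A =====
-- enumerate(sequence) starting at index n
def pvEnumFrom (n : Nat) : List String → List (Nat × String)
  | [] => []
  | h :: t => (n, h) :: pvEnumFrom (n + 1) t

-- A's search loop: first i with (sym==b or sym==c) and {b,c} ⊆ set(sequence[:i+1])
def pvAFind (seq : List String) (b c : String) : List (Nat × String) → Option Nat
  | [] => none
  | (i, sym) :: rest =>
    if sym == b || sym == c then
      let symbols_seen : PySem.Set String := PySem.Set.ofList (seq.take (i + 1))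
      if symbols_seen.contains b && symbols_seen.contains c then some i
      else pvAFind seq b c rest
    else pvAFind seq b c rest

def evaluate_not_a_until_b_and_c (sequence : List String) (a : String) (b : String) (c : String) : Bool :=
  if sequence = [] then true
  else
    match pvAFind sequence b c (pvEnumFrom 0 sequence) with
    | none => !(sequence.contains a)                 -- a not in sequence
    | some p => !((sequence.take p).contains a)      -- a not in sequence[:p]

-- ===== PORT B =====
def pvAltGo (a b c : String) : List String → Bool → Bool → Bool → Bool
  | [], _, _, sa => !sa
  | sym :: rest, sb, sc, sa =>
    let sb := sb || sym == b
    let sc := sc || sym == c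
    if (sym == b || sym == c) && sb && sc then !sa
    else pvAltGo a b c rest sb sc (sa || sym == a)

def evaluate_not_a_until_b_and_c_alt (sequence : List String) (a : String) (b : String) (c : String) : Bool :=
  pvAltGo a b c sequence false false false

-- ===== PRECONDITION & SPEC =====
def Spec_evaluate_not_a_until_b_and_c (sequence : List String) (a : String) (b : String) (c : String) (out : Bool) : Prop := out = evaluate_not_a_until_b_and_c_alt sequence a b c
instance (sequence : List String) (a : String) (b : String) (c : String) (out : Bool) : Decidable (Spec_evaluate_not_a_until_b_and_c sequence a b c out) := by unfold Spec_evaluate_not_a_until_b_and_c; infer_instance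

-- ===== CLAIM (what is proved, stated in full; the proofs are below) =====
def Claim_equal_evaluate_not_a_until_b_and_c : Prop := ∀ (sequence : List String) (a : String) (b : String) (c : String), Dom_evaluate_not_a_until_b_and_c sequence a b c → Spec_evaluate_not_a_until_b_and_c sequence a b c (evaluate_not_a_until_b_and_c sequence a b c)

-- ===== LEMMAS AND PROOFS =====

theorem pvSet_contains_eq {x : String} {l : List String} :
    (PySem.Set.ofList l).contains x = l.contains x := by
  simp [PySem.Set.mem_ofList]

theorem pvContainsSnoc (l : List String) (h x : String) :
    (l ++ [h]).contains x = (l.contains x || (h == x)) := by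
  simp [eq_comm, Bool.beq_eq_decide_eq]

-- Loop invariant: scanning the tail `rest` of `pre ++ rest` starting at index pre.length,
-- A's post-processed search result equals B's pass with flags = containment in `pre`.
theorem pvKey (a b c : String) : ∀ (rest pre : List String),
    (match pvAFind (pre ++ rest) b c (pvEnumFrom pre.length rest) with
     | none => !((pre ++ rest).contains a)
     | some p => !(((pre ++ rest).take p).contains a))
    = pvAltGo a b c rest (pre.contains b) (pre.contains c) (pre.contains a) := by
  intro rest
  induction rest with
  | nil => intro pre; simp [pvEnumFrom, pvAFind, pvAltGo]
  | cons h t ih =>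
    intro pre
    have hiht := ih (pre ++ [h])
    have hb' : (pre.contains b || (h == b)) = (pre ++ [h]).contains b := (pvContainsSnoc pre h b).symm
    have hc' : (pre.contains c || (h == c)) = (pre ++ [h]).contains c := (pvContainsSnoc pre h c).symm
    have ha' : (pre.contains a || (h == a)) = (pre ++ [h]).contains a := (pvContainsSnoc pre h a).symm
    have hassoc : pre ++ h :: t = (pre ++ [h]) ++ t := by simp
    have htake1 : (pre ++ h :: t).take (pre.length + 1) = pre ++ [h] := by
      rw [hassoc, show pre.length + 1 = (pre ++ [h]).length by simp]
      exact List.take_left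
    have htake0 : (pre ++ h :: t).take pre.length = pre := List.take_left
    simp only [pvEnumFrom, pvAFind, pvAltGo, pvSet_contains_eq, htake1, pvContainsSnoc]
    cases hbc : (h == b || h == c) with
    | false =>
      simp only [Bool.false_and, Bool.false_eq_true, if_false]
      rw [hb', hc', ha', hassoc, show pre.length + 1 = (pre ++ [h]).length by simp]
      exact hiht
    | true =>
      simp only [Bool.true_and, if_true]
      cases hsbc : ((pre.contains b || (h == b)) && (pre.contains c || (h == c))) with
      | true =>
        simp only [Bool.and_eq_true] at *
        simp [htake0]
      | false =>
        simp only [Bool.false_eq_true, if_false]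
        rw [hb', hc', ha', hassoc, show pre.length + 1 = (pre ++ [h]).length by simp]
        exact hiht

-- ===== VERDICT (by name: the statement is the Claim_ definition above) =====
theorem evaluate_not_a_until_b_and_c_spec : Claim_equal_evaluate_not_a_until_b_and_c := by
  intro sequence a b c _
  unfold Spec_evaluate_not_a_until_b_and_c evaluate_not_a_until_b_and_c evaluate_not_a_until_b_and_c_alt
  by_cases hseq : sequence = []
  · subst hseq; simp [pvAltGo]
  · rw [if_neg hseq]
    simpa using pvKey a b c sequence []
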